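-- pv_equiv track=rewrite | github.com/miliar/Code_Jam_Webscraper | Solutions_python/Problem_180/1242.py | truth
-- ===== SOURCE A (Python) =====
-- def truth(guess,k):
--     n=len(guess)
--     tg=0
--     for i in range(0,n):
--         tg=tg*k
--         tg=tg+guess[i]
--         if (i<n-1):
--             tg=tg-1
--     return(tg)
-- ===== SOURCE B (Python) =====
-- def truth(guess, k):
--     tg = 0
--     p = 1
--     for j, g in enumerate(reversed(guess)):
--         tg += g * p
--         if j > 0:
--             tg -= p
--         p *= k
--     return tg
-- ===== Notes on version B (the rewrite author's own statement) =====
-- stated objective: alternative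
-- what changed: Replaces Horner's forward multiply-then-add recurrence (with the -1 folded into each non-final step) by a reverse-order summation that maintains an explicit power p of k and subtracts p for every position except the last.
import Mathlib
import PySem

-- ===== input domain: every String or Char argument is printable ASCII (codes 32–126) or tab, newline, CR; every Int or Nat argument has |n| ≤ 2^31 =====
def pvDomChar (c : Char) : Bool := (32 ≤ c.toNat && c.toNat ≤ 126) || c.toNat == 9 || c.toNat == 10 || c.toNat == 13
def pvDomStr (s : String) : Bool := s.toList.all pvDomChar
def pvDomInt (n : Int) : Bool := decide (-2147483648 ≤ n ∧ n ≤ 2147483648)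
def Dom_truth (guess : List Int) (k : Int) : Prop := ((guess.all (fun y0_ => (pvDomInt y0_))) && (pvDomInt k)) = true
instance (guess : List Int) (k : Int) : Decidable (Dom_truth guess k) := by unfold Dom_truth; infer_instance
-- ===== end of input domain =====

-- B replaces Horner's forward multiply-then-add loop by a reverse-order summation
-- maintaining an explicit power of k (objective: alternative decomposition, same cost).

-- ===== PORT A =====
def truth (guess : List Int) (k : Int) : Int :=
  let n : Int := (guess.length : Int)
  (PySem.List.pyRange 0 n 1).foldl
    (fun tg i =>
      let tg := tg * k
      let tg := tg + PySem.List.pyGetD guess i 0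
      if i < n - 1 then tg - 1 else tg) 0

-- ===== PORT B =====
def truth_alt (guess : List Int) (k : Int) : Int :=
  ((PySem.List.enumerate guess.reverse 0).foldl
    (fun (s : Int × Int) (jg : Int × Int) =>
      let tg := s.1 + jg.2 * s.2
      let tg := if jg.1 > 0 then tg - s.2 else tg
      (tg, s.2 * k)) ((0 : Int), (1 : Int))).1

-- ===== PRECONDITION & SPEC =====
def Spec_truth (guess : List Int) (k : Int) (out : Int) : Prop := out = truth_alt guess k
instance (guess : List Int) (k : Int) (out : Int) : Decidable (Spec_truth guess k out) := by unfold Spec_truth; infer_instance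

-- ===== CLAIM (what is proved, stated in full; the proofs are below) =====
def Claim_equal_truth : Prop := ∀ (guess : List Int) (k : Int), Dom_truth guess k → Spec_truth guess k (truth guess k)

-- ===== LEMMAS AND PROOFS =====

-- Σ (xs[m] - 1) * k^m over a list, head at power 0
def Hpoly (k : Int) : List Int → Int
  | [] => 0
  | g :: t => (g - 1) + k * Hpoly k t

-- the "always subtract" Horner fold computes Hpoly of the reverse
theorem sfold_eq_hpoly (k : Int) (m : List Int) :
    m.foldl (fun a x => a * k + x - 1) 0 = Hpoly k m.reverse := by
  induction m using List.reverseRecOn with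
  | nil => simp [Hpoly]
  | append_singleton t x ih =>
      rw [List.foldl_append, List.reverse_append, List.reverse_singleton, List.singleton_append]
      simp only [List.foldl_cons, List.foldl_nil, Hpoly, ih]
      ring

-- A-side: the range fold (no subtract on the last step) equals Hpoly of the reverse, plus 1 when nonempty
theorem truth_eq_hpoly (guess : List Int) (k : Int) :
    truth guess k = Hpoly k guess.reverse + (if guess = [] then 0 else 1) := by
  induction guess using List.reverseRecOn with
  | nil => simp [truth, Hpoly, PySem.List.pyRange_one_eq_nil]
  | append_singleton l g ih =>
      clear ih
      have hlen : (((l ++ [g]).length : Nat) : Int) = (l.length : Int) + 1 := by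
        simp
      simp only [truth]
      rw [hlen, PySem.List.pyRange_one_succ_right (by positivity), List.foldl_append]
      have hcongr :
          (PySem.List.pyRange 0 (l.length : Int) 1).foldl
            (fun tg i =>
              if i < (l.length : Int) + 1 - 1 then
                tg * k + PySem.List.pyGetD (l ++ [g]) i 0 - 1
              else tg * k + PySem.List.pyGetD (l ++ [g]) i 0) 0
          = (PySem.List.pyRange 0 (l.length : Int) 1).foldl
            (fun a i => a * k + PySem.List.pyGetD l i 0 - 1) 0 := by
        apply PySem.List.foldl_congr_mem
        intro acc x hx
        rw [PySem.List.mem_pyRange_one] at hx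
        obtain ⟨h0, h1⟩ := hx
        obtain ⟨m, rfl⟩ := Int.eq_ofNat_of_zero_le h0
        have hm : m < l.length := by exact_mod_cast h1
        rw [if_pos (by omega), PySem.List.pyGetD_natCast, PySem.List.pyGetD_natCast]
        congr 1
        rw [List.getD_eq_getElem?_getD, List.getD_eq_getElem?_getD,
          List.getElem?_append_left hm]
      simp only [hcongr]
      rw [show (fun (a : Int) (i : Int) => a * k + PySem.List.pyGetD l i 0 - 1)
            = (fun (a : Int) (i : Int) =>
                (fun (a : Int) (x : Int) => a * k + x - 1) a (PySem.List.pyGetD l i 0)) from rfl,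
        PySem.List.foldl_pyRange_zero_pyGetD' l 0 (fun a x => a * k + x - 1) 0,
        sfold_eq_hpoly]
      have hget : PySem.List.pyGetD (l ++ [g]) (l.length : Int) 0 = g := by
        rw [PySem.List.pyGetD_natCast]
        simp [List.getD]
      simp only [List.foldl_cons, List.foldl_nil]
      rw [if_neg (by omega), hget]
      rw [show (l ++ [g]).reverse = g :: l.reverse by simp, if_neg (by simp)]
      simp only [Hpoly]
      ring

-- B-side tail loop: once j ≥ 1 the branch always subtracts p
theorem bfold_tail (k : Int) (t : List Int) :
    ∀ (s : Int) (st : Int × Int), 1 ≤ s →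
      ((PySem.List.enumerate t s).foldl
        (fun (st : Int × Int) (jg : Int × Int) =>
          let tg := st.1 + jg.2 * st.2
          let tg := if jg.1 > 0 then tg - st.2 else tg
          (tg, st.2 * k)) st).1 = st.1 + st.2 * Hpoly k t := by
  induction t with
  | nil => intro s st _; simp [PySem.List.enumerate_nil, Hpoly]
  | cons g t ih =>
      intro s st hs
      rw [PySem.List.enumerate_cons, List.foldl_cons, ih (s + 1) _ (by omega)]
      simp only [Hpoly]
      rw [if_pos (by omega)]
      ring

theorem truth_alt_eq_hpoly (guess : List Int) (k : Int) :
    truth_alt guess k = Hpoly k guess.reverse + (if guess = [] then 0 else 1) := by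
  rcases hr : guess.reverse with _ | ⟨g, t⟩
  · have hg : guess = [] := by simpa using congrArg List.reverse hr
    subst hg
    simp [truth_alt, Hpoly, PySem.List.enumerate_nil]
  · have hg : guess ≠ [] := by
      intro h; rw [h] at hr; simp at hr
    rw [if_neg hg]
    unfold truth_alt
    rw [hr, PySem.List.enumerate_cons, List.foldl_cons,
      bfold_tail k t (0 + 1) _ (by omega)]
    simp only [Hpoly]
    rw [if_neg (by omega)]
    ring

-- ===== VERDICT (by name: the statement is the Claim_ definition above) =====
theorem truth_spec : Claim_equal_truth := by
  intro guess k _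
  unfold Spec_truth
  rw [truth_eq_hpoly, truth_alt_eq_hpoly]
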